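-- pv_equiv track=rewrite | github.com/neacisu/Neanelu_Shopify | Research Produse/Scripts/sample_by_vendor.py | pick_vendors_alphabet_first
-- ===== SOURCE A (Python) =====
-- from collections import defaultdict
-- from typing import Any, Dict, List, Optional, Tuple
--
-- def _vendor_bucket(vendor: str) -> str:
--     v = (vendor or "").strip()
--     if not v:
--         return "#"
--     ch = v[0].upper()
--     if "A" <= ch <= "Z":
--         return ch
--     return "#"
--
-- def pick_vendors_alphabet_first(vendors_sorted: List[str], alphabet: str) -> List[str]:
--     """Pick the first vendor for each bucket letter in `alphabet`.
--
--     Convention: `alphabet` can include a final '#' bucket for non A-Z initials.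
--     """
--     by_bucket: Dict[str, List[str]] = defaultdict(list)
--     for v in vendors_sorted:
--         by_bucket[_vendor_bucket(v)].append(v)
--
--     picked: List[str] = []
--     for bucket in alphabet:
--         if bucket in by_bucket and by_bucket[bucket]:
--             picked.append(by_bucket[bucket][0])
--     return picked
-- ===== SOURCE B (Python) =====
-- from typing import List, Optional
--
--
-- def _vendor_bucket(vendor: str) -> str:
--     v = (vendor or "").strip()
--     if not v:
--         return "#"
--     ch = v[0].upper()
--     if "A" <= ch <= "Z":
--         return ch
--     return "#"
--
--
-- def pick_vendors_alphabet_first(vendors_sorted: List[str], alphabet: str) -> List[str]: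
--     """For each bucket letter, rescan the sorted vendor list for its first member."""
--     picked: List[str] = []
--     for bucket in alphabet:
--         first: Optional[str] = next(
--             (v for v in vendors_sorted if _vendor_bucket(v) == bucket), None
--         )
--         if first is not None:
--             picked.append(first)
--     return picked
-- ===== Notes on version B (the rewrite author's own statement) =====
-- stated objective: alternative
-- what changed: B drops A's bucket-grouping defaultdict entirely: for each character of `alphabet` it rescans vendors_sorted and takes the first vendor whose bucket matches, so no index is built or shared between buckets.
import Mathlib
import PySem

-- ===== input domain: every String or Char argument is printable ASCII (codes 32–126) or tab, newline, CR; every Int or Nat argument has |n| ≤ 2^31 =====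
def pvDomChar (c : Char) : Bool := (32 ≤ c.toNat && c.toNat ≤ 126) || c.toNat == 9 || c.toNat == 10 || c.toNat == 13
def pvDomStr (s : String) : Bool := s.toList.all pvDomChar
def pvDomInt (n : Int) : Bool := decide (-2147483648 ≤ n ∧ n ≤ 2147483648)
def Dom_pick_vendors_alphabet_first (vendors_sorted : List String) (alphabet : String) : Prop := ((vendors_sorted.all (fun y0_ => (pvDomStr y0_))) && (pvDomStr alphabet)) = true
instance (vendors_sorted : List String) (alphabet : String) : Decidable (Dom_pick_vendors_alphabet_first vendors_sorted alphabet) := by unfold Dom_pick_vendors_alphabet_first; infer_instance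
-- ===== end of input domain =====

-- B replaces A's bucket-grouping dict with a per-bucket rescan of the vendor list (alternative decomposition).


-- ===== PORT A =====
-- _vendor_bucket: strip, '#' if empty, else first char uppercased if it is A..Z, else '#'
def pvBucket (vendor : String) : Char :=
  let v := PySem.Chars.strip (if vendor = "" then "".toList else vendor.toList)
  match v with
  | [] => '#'
  | c :: _ =>
    let ch := PySem.Chars.upperChar c
    if 'A' ≤ ch ∧ ch ≤ 'Z' then ch else '#'

def pick_vendors_alphabet_first (vendors_sorted : List String) (alphabet : String) : List String :=
  let by_bucket : PySem.Dict Char (List String) :=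
    vendors_sorted.foldl
      (fun d v => d.insert (pvBucket v) (d.getD (pvBucket v) [] ++ [v]))
      PySem.Dict.empty
  alphabet.toList.foldl
    (fun picked bucket =>
      match by_bucket.get? bucket with
      | some (x :: _) => picked ++ [x]
      | _ => picked)
    []

-- ===== PORT B =====
def pick_vendors_alphabet_first_alt (vendors_sorted : List String) (alphabet : String) : List String :=
  alphabet.toList.filterMap
    (fun bucket => vendors_sorted.find? (fun v => pvBucket v == bucket))

-- ===== PRECONDITION & SPEC =====
def Spec_pick_vendors_alphabet_first (vendors_sorted : List String) (alphabet : String) (out : List String) : Prop := out = pick_vendors_alphabet_first_alt vendors_sorted alphabet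
instance (vendors_sorted : List String) (alphabet : String) (out : List String) : Decidable (Spec_pick_vendors_alphabet_first vendors_sorted alphabet out) := by unfold Spec_pick_vendors_alphabet_first; infer_instance

-- ===== CLAIM (what is proved, stated in full; the proofs are below) =====
def Claim_equal_pick_vendors_alphabet_first : Prop := ∀ (vendors_sorted : List String) (alphabet : String), Dom_pick_vendors_alphabet_first vendors_sorted alphabet → Spec_pick_vendors_alphabet_first vendors_sorted alphabet (pick_vendors_alphabet_first vendors_sorted alphabet)

-- ===== LEMMAS AND PROOFS =====
-- The grouping dict maps each bucket to the sublist of vendors in that bucket, in order.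
theorem build_get (vs : List String) (d : PySem.Dict Char (List String)) (b : Char) :
    (vs.foldl (fun d v => d.insert (pvBucket v) (d.getD (pvBucket v) [] ++ [v])) d).get? b =
      (if vs.filter (fun v => pvBucket v == b) = [] then d.get? b
       else some (d.getD b [] ++ vs.filter (fun v => pvBucket v == b))) := by
  induction vs generalizing d with
  | nil => simp
  | cons v vs ih =>
    simp only [List.foldl_cons, List.filter_cons]
    by_cases hb : pvBucket v = b
    · subst hb
      simp only [BEq.rfl, if_pos]
      rw [ih]
      by_cases hf : vs.filter (fun v' => pvBucket v' == pvBucket v) = []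
      · simp [hf, PySem.Dict.get?_insert_self]
      · simp [hf, PySem.Dict.getD_insert_self]
    · have hbne : (pvBucket v == b) = false := by simp [hb]
      simp only [hbne, Bool.false_eq_true, if_false]
      rw [ih]
      rw [PySem.Dict.get?_insert_of_ne _ _ (fun h => hb h.symm)]
      rw [PySem.Dict.getD_insert_of_ne _ _ _ (fun h => hb h.symm)]

theorem find?_eq_head?_filter' {α : Type} (p : α → Bool) (xs : List α) :
    xs.find? p = (xs.filter p).head? := by
  induction xs with
  | nil => rfl
  | cons x xs ih =>
    cases h : p x
    · rw [List.find?_cons_of_neg (by simp [h]), List.filter_cons_of_neg (by simp [h]), ih]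
    · rw [List.find?_cons_of_pos h, List.filter_cons_of_pos h]
      rfl

theorem pick_foldl_eq (vs : List String) (chars : List Char) (acc : List String) :
    chars.foldl
      (fun picked bucket =>
        match (vs.foldl (fun d v => d.insert (pvBucket v) (d.getD (pvBucket v) [] ++ [v]))
            PySem.Dict.empty).get? bucket with
        | some (x :: _) => picked ++ [x]
        | _ => picked) acc
    = acc ++ chars.filterMap (fun bucket => vs.find? (fun v => pvBucket v == bucket)) := by
  induction chars generalizing acc with
  | nil => simp
  | cons c cs ih =>
    simp only [List.foldl_cons, List.filterMap_cons]
    rw [build_get, find?_eq_head?_filter']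
    by_cases hf : vs.filter (fun v => pvBucket v == c) = []
    · simp [hf, ih]
    · obtain ⟨x, xs, hx⟩ := List.exists_cons_of_ne_nil hf
      simp [hx, ih]

-- ===== VERDICT (by name: the statement is the Claim_ definition above) =====
theorem pick_vendors_alphabet_first_spec : Claim_equal_pick_vendors_alphabet_first := by
  intro vs al _
  show pick_vendors_alphabet_first vs al = pick_vendors_alphabet_first_alt vs al
  unfold pick_vendors_alphabet_first pick_vendors_alphabet_first_alt
  simpa using pick_foldl_eq vs al.toList []
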